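-- pv_equiv track=rewrite | github.com/mattklepp/k4 | refined_signed_pipeline.py | apply_refined_corrections
-- ===== SOURCE A (Python) =====
-- from typing import List, Tuple, Dict, Any
--
-- def apply_refined_corrections(text: str, region: str, offsets: List[int]) -> str:
--     """
--     Apply corrections using the refined signed offsets.
--     """
--     corrected = list(text)
--
--     # Apply offset-based corrections
--     for i, offset in enumerate(offsets):
--         if i < len(corrected):
--             char_val = ord(corrected[i]) - ord('A')
--             # Apply the signed offset directly
--             corrected_val = (char_val + offset) % 26
--             corrected[i] = chr(corrected_val + ord('A'))
--
--     return ''.join(corrected)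
-- ===== SOURCE B (Python) =====
-- def apply_refined_corrections(text: str, region: str, offsets: list) -> str:
--     """
--     Apply corrections using the refined signed offsets.
--     Run-length batching: split the offset list into maximal runs of equal
--     offsets, build one alphabet translation table per run (each distinct
--     character shifted once), translate the matching text segment through it,
--     and append the untouched tail.
--     """
--     ALPHA = "ABCDEFGHIJKLMNOPQRSTUVWXYZ"
--     m = min(len(text), len(offsets))
--     pieces = []
--     start = 0
--     while start < m:
--         v = offsets[start]
--         end = start + 1
--         while end < m and offsets[end] == v:
--             end += 1
--         seg = text[start:end]
--         table = {ch: ALPHA[(ord(ch) + v - 65) % 26] for ch in set(seg)}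
--         pieces.append(''.join(table[c] for c in seg))
--         start = end
--     pieces.append(text[m:])
--     return ''.join(pieces)
-- ===== Notes on version B (the rewrite author's own statement) =====
-- stated objective: alternative
-- what changed: Replaces A's single guarded index loop with in-place char-list writes by run-length batching: the offset list is split into maximal runs of equal offsets, one alphabet translation table (dict over the segment's distinct characters) is built per run, the matching text segment is translated through it in one pass, and the untouched tail text[m:] is appended.
import Mathlib
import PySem

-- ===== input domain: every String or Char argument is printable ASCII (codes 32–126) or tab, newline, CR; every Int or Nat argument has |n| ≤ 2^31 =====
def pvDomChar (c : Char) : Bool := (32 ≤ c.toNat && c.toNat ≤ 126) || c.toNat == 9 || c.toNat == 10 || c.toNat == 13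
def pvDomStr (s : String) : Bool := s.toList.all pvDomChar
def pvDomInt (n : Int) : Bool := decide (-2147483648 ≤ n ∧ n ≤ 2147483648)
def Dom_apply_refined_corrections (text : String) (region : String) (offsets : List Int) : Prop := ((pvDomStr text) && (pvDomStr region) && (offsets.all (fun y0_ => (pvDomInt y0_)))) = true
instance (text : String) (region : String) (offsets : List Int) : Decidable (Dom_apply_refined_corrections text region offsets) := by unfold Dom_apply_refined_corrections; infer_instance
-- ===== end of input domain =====

-- B replaces A's per-index guarded in-place writes by run-length batching: maximal runs of
-- equal offsets, one alphabet translation table per run, whole-segment translation, untouched tail.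
-- Objective: alternative (same asymptotic cost, different algorithmic decomposition).

-- ===== PORT A =====
-- shared char transform of A: chr((ord(c) - ord('A') + offset) % 26 + ord('A'))
def arcShift (c : Char) (off : Int) : Char :=
  Char.ofNat ((PySem.Int.mod ((c.toNat : Int) - 65 + off) 26 + 65).toNat)

-- A's loop: for i, offset in enumerate(offsets): if i < len(corrected): corrected[i] = …
def arcLoop : List Char → Nat → List Int → List Char
  | cs, _, [] => cs
  | cs, i, off :: rest =>
    if h : i < cs.length then
      arcLoop (cs.set i (arcShift cs[i] off)) (i + 1) rest
    else
      arcLoop cs (i + 1) rest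

def apply_refined_corrections (text : String) (region : String) (offsets : List Int) : String :=
  String.mk (arcLoop text.toList 0 offsets)

-- ===== PORT B =====
def bAlpha : List Char :=
  ['A','B','C','D','E','F','G','H','I','J','K','L','M',
   'N','O','P','Q','R','S','T','U','V','W','X','Y','Z']

-- ALPHA[(ord(ch) + v - 65) % 26]: the index is always in [0, 26), so getD is exact
def bShift (v : Int) (c : Char) : Char :=
  bAlpha.getD (PySem.Int.mod ((c.toNat : Int) + v - 65) 26).toNat 'A'

-- inner while: end = start+1; while end < m and offsets[end] == v: end += 1
-- (offsets[end] is read only when end < m ≤ len(offsets), so getD is exact)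
def bRunEnd (offsets : List Int) (m : Nat) (v : Int) (e : Nat) : Nat :=
  if _h : e < m ∧ offsets.getD e 0 = v then bRunEnd offsets m v (e + 1) else e
termination_by m - e
decreasing_by omega

theorem bRunEnd_ge (offsets : List Int) (m : Nat) (v : Int) (e : Nat) :
    e ≤ bRunEnd offsets m v e := by
  fun_induction bRunEnd offsets m v e with
  | case1 e h ih => omega
  | case2 e h => omega

-- table = {ch: ALPHA[(ord(ch)+v-65)%26] for ch in set(seg)}
def bTable (seg : List Char) (v : Int) : PySem.Dict Char Char :=
  (PySem.Set.ofList seg).foldl (fun d ch => d.insert ch (bShift v ch)) PySem.Dict.empty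

-- outer while over runs; pieces accumulator; table[c] never misses (c ∈ seg), so getD is exact
def bRunLoop (tl : List Char) (offsets : List Int) (m : Nat) (start : Nat)
    (pieces : List (List Char)) : List (List Char) :=
  if _h : start < m then
    let v := offsets.getD start 0
    let e := bRunEnd offsets m v (start + 1)
    let seg := PySem.List.slice tl (some (start : Int)) (some (e : Int))
    let table := bTable seg v
    bRunLoop tl offsets m e (pieces ++ [seg.map (fun c => ((table.get? c).getD c))])
  else pieces
termination_by m - start
decreasing_by
  have := bRunEnd_ge offsets m (offsets.getD start 0) (start + 1)
  omega

def apply_refined_corrections_alt (text : String) (region : String) (offsets : List Int) : String :=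
  let tl := text.toList
  let m := min tl.length offsets.length
  String.mk ((bRunLoop tl offsets m 0 [] ++ [PySem.List.slice tl (some (m : Int)) none]).flatten)

-- ===== PRECONDITION & SPEC =====
def Spec_apply_refined_corrections (text : String) (region : String) (offsets : List Int) (out : String) : Prop := out = apply_refined_corrections_alt text region offsets
instance (text : String) (region : String) (offsets : List Int) (out : String) : Decidable (Spec_apply_refined_corrections text region offsets out) := by unfold Spec_apply_refined_corrections; infer_instance

-- ===== CLAIM (what is proved, stated in full; the proofs are below) =====
def Claim_equal_apply_refined_corrections : Prop := ∀ (text : String) (region : String) (offsets : List Int), Dom_apply_refined_corrections text region offsets → Spec_apply_refined_corrections text region offsets (apply_refined_corrections text region offsets)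

-- ===== LEMMAS AND PROOFS =====

theorem arcLoop_eq (offs : List Int) : ∀ (cs : List Char) (i : Nat),
    arcLoop cs i offs =
      cs.take i ++ ((cs.drop i).zip offs).map (fun p => arcShift p.1 p.2)
        ++ cs.drop (i + offs.length) := by
  induction offs with
  | nil =>
    intro cs i
    simp [arcLoop]
  | cons off rest ih =>
    intro cs i
    by_cases h : i < cs.length
    · have hdrop : cs.drop i = cs[i] :: cs.drop (i + 1) :=
        List.drop_eq_getElem_cons h
      have htake : (cs.set i (arcShift cs[i] off)).take (i + 1)
          = cs.take i ++ [arcShift cs[i] off] := by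
        rw [List.take_set, List.take_add_one, List.getElem?_eq_getElem h]
        rw [List.set_append]
        simp [Nat.min_eq_left (Nat.le_of_lt h)]
      rw [arcLoop, dif_pos h, ih, htake]
      rw [List.drop_set, if_pos (Nat.lt_succ_self i),
        List.drop_set, if_pos (by omega : i < i + 1 + rest.length)]
      have harith : i + 1 + rest.length = i + (rest.length + 1) := by omega
      rw [harith, hdrop, List.zip_cons_cons, List.map_cons]
      simp
    · rw [arcLoop, dif_neg h, ih]
      have hle : cs.length ≤ i := Nat.le_of_not_lt h
      rw [List.take_of_length_le hle, List.take_of_length_le (Nat.le_succ_of_le hle),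
        List.drop_of_length_le hle, List.drop_of_length_le (Nat.le_succ_of_le hle),
        List.drop_of_length_le (le_trans (Nat.le_succ_of_le hle) (Nat.le_add_right _ rest.length)),
        List.drop_of_length_le (by omega : cs.length ≤ i + (off :: rest).length)]
      simp

theorem bShift_eq_arcShift (v : Int) (c : Char) : bShift v c = arcShift c v := by
  unfold bShift arcShift
  have hx : (c.toNat : Int) + v - 65 = (c.toNat : Int) - 65 + v := by ring
  rw [hx]
  set r := PySem.Int.mod ((c.toNat : Int) - 65 + v) 26 with hr
  have h0 : 0 ≤ r := PySem.Int.mod_nonneg _ (by omega)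
  have h1 : r < 26 := PySem.Int.mod_lt _ (by omega)
  have hn : (r + 65).toNat = r.toNat + 65 := by omega
  rw [hn]
  set n := r.toNat with hnn
  have hlt : n < 26 := by omega
  interval_cases n <;> rfl

theorem bRunEnd_le (offsets : List Int) (m : Nat) (v : Int) (e : Nat) (he : e ≤ m) :
    bRunEnd offsets m v e ≤ m := by
  fun_induction bRunEnd offsets m v e with
  | case1 e h ih => exact ih (by omega)
  | case2 e h => omega

theorem bRunEnd_const (offsets : List Int) (m : Nat) (v : Int) (e : Nat) :
    ∀ i, e ≤ i → i < bRunEnd offsets m v e → offsets.getD i 0 = v := by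
  fun_induction bRunEnd offsets m v e with
  | case1 e h ih =>
    intro i h1 h2
    rcases Nat.eq_or_lt_of_le h1 with rfl | h1'
    · exact h.2
    · exact ih i h1' h2
  | case2 e h => intro i h1 h2; omega

theorem foldl_insert_get (f : Char → Char) (l : List Char) :
    ∀ (d : PySem.Dict Char Char) (c : Char),
      (c ∈ l ∨ d.get? c = some (f c)) →
      (l.foldl (fun d ch => d.insert ch (f ch)) d).get? c = some (f c) := by
  induction l with
  | nil => intro d c h; simpa using h.elim (fun h => absurd h (List.not_mem_nil)) id
  | cons x xs ih =>
    intro d c h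
    simp only [List.foldl_cons]
    rcases h with h | h
    · rcases List.mem_cons.mp h with rfl | hxs
      · by_cases hcx : c ∈ xs
        · exact ih _ _ (Or.inl hcx)
        · exact ih _ _ (Or.inr (PySem.Dict.get?_insert_self d c (f c)))
      · exact ih _ _ (Or.inl hxs)
    · by_cases hcx2 : c = x
      · subst hcx2; exact ih _ _ (Or.inr (PySem.Dict.get?_insert_self d c (f c)))
      · exact ih _ _ (Or.inr (by rw [PySem.Dict.get?_insert_of_ne d (f x) hcx2]; exact h))

theorem bTable_get (seg : List Char) (v : Int) (c : Char) (hc : c ∈ seg) :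
    (bTable seg v).get? c = some (bShift v c) := by
  unfold bTable
  apply foldl_insert_get
  left
  exact (PySem.Set.mem_ofList _ _).mpr hc

theorem seg_map_eq (tl : List Char) (offsets : List Int) (m : Nat)
    (hm : m = min tl.length offsets.length) (start e : Nat)
    (hse : start ≤ e) (hem : e ≤ m) (v : Int)
    (hconst : ∀ i, start ≤ i → i < e → offsets.getD i 0 = v) :
    ((tl.drop start).take (e - start)).map (bShift v) =
      (((tl.zip offsets).drop start).take (e - start)).map
        (fun p => arcShift p.1 p.2) := by
  apply List.ext_getElem
  · simp; omega
  · intro j hj1 hj2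
    have hjm : start + j < m := by
      simp at hj1; omega
    have hjt : start + j < tl.length := by omega
    have hjo : start + j < offsets.length := by omega
    simp only [List.getElem_map, List.getElem_take, List.getElem_drop,
      List.getElem_zip]
    have hv : offsets[start + j] = v := by
      have := hconst (start + j) (by omega) (by
        simp at hj1; omega)
      rwa [List.getD_eq_getElem _ _ hjo] at this
    rw [hv, bShift_eq_arcShift]

theorem bRunLoop_eq (tl : List Char) (offsets : List Int) (m : Nat)
    (hm : m = min tl.length offsets.length) (start : Nat) (pieces : List (List Char)) :
      (bRunLoop tl offsets m start pieces).flatten =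
        pieces.flatten ++ ((tl.zip offsets).drop start).map (fun p => arcShift p.1 p.2) := by
  fun_induction bRunLoop tl offsets m start pieces with
  | case1 start pieces h v e seg table ih =>
    rw [ih]
    have he1 : start + 1 ≤ e := bRunEnd_ge offsets m v (start + 1)
    have he2 : e ≤ m := bRunEnd_le offsets m v (start + 1) (by omega)
    have hconst : ∀ i, start ≤ i → i < e → offsets.getD i 0 = v := by
      intro i h1 h2
      rcases Nat.eq_or_lt_of_le h1 with rfl | h1'
      · rfl
      · exact bRunEnd_const offsets m v (start + 1) i (by omega) h2
    have hseg : seg = (tl.drop start).take (e - start) := by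
      show PySem.List.slice tl (some ((start : Nat) : Int)) (some ((e : Nat) : Int)) = _
      rw [PySem.List.slice_natCast]
    have hpiece : List.map (fun c => (table.get? c).getD c) seg = seg.map (bShift v) := by
      apply List.map_congr_left
      intro c hc
      rw [show table = bTable seg v from rfl, bTable_get seg v c hc]
      rfl
    rw [hpiece, hseg, seg_map_eq tl offsets m hm start e (by omega) he2 v hconst]
    rw [List.flatten_append]
    simp only [List.flatten_cons, List.flatten_nil, List.append_nil, List.append_assoc]
    congr 1
    rw [← List.map_append]
    congr 1
    have hdd : List.drop e (tl.zip offsets)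
        = List.drop (e - start) (List.drop start (tl.zip offsets)) := by
      rw [List.drop_drop]
      congr 1
      omega
    rw [hdd, List.take_append_drop]
  | case2 start pieces h =>
    have hlen : (tl.zip offsets).length = m := by simp [hm]
    rw [List.drop_eq_nil_of_le (by omega)]
    simp

-- ===== VERDICT (by name: the statement is the Claim_ definition above) =====
theorem apply_refined_corrections_spec : Claim_equal_apply_refined_corrections := by
  intro text region offsets _
  unfold Spec_apply_refined_corrections apply_refined_corrections apply_refined_corrections_alt
  rw [arcLoop_eq]
  show _ = String.mk (bRunLoop text.toList offsets (min text.toList.length offsets.length) 0 []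
      ++ [PySem.List.slice text.toList (some ((min text.toList.length offsets.length : Nat) : Int)) none]).flatten
  rw [List.flatten_append, bRunLoop_eq text.toList offsets (min text.toList.length offsets.length) rfl 0 []]
  rw [PySem.List.slice_from_natCast]
  have hdrop : text.toList.drop (min text.length offsets.length)
      = text.toList.drop offsets.length := by
    rcases Nat.le_total offsets.length text.length with h | h
    · rw [Nat.min_eq_right h]
    · rw [Nat.min_eq_left h, List.drop_of_length_le (by simpa using h),
        List.drop_of_length_le (by simpa using h)]
  simp [hdrop]
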